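-- pv_equiv track=rewrite | github.com/diminDDL/OpenTagBridge | SpotApi/CreateBleDevice/create_ble_device.py | _chunk_sizes
-- ===== SOURCE A (Python) =====
-- def _chunk_sizes(total_key_count: int, window_size: int) -> list[int]:
--     sizes = []
--     remaining = total_key_count
--     while remaining > 0:
--         size = min(window_size, remaining)
--         sizes.append(size)
--         remaining -= size
--     return sizes
-- ===== SOURCE B (Python) =====
-- def _chunk_sizes(total_key_count: int, window_size: int) -> list[int]:
--     if total_key_count <= 0:
--         return []
--     full, rem = divmod(total_key_count, window_size)
--     return [window_size] * full + ([rem] if rem else [])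
-- ===== Notes on version B (the rewrite author's own statement) =====
-- stated objective: simpler
-- what changed: Replaces the chunk-by-chunk subtraction loop with a single divmod closed form: [window_size]*full plus an optional nonzero remainder chunk.
import Mathlib
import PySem

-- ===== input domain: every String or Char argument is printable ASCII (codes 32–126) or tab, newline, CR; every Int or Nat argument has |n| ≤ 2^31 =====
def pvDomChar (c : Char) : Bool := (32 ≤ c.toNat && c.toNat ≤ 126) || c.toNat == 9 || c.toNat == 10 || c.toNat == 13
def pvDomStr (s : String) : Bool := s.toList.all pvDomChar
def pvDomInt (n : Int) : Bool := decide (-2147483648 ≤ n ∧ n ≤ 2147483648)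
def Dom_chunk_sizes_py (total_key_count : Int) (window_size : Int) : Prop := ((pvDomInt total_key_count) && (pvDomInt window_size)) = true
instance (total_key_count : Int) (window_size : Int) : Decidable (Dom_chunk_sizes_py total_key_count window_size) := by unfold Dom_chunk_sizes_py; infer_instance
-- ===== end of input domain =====

-- B replaces the chunk-by-chunk subtraction loop with one divmod closed form (objective: simpler).

-- ===== PORT A =====
-- while remaining > 0: size = min(window_size, remaining); sizes.append(size); remaining -= size
-- The inner `0 < size` guard only makes the recursion total: when it fails (window_size ≤ 0
-- with remaining > 0) Python A loops forever; those inputs are excluded by Pre_.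
def chunkLoopA (window_size : Int) (remaining : Int) (sizes : List Int) : List Int :=
  if _h : remaining > 0 then
    let size := min window_size remaining
    if _hs : 0 < size then
      chunkLoopA window_size (remaining - size) (sizes ++ [size])
    else sizes
  else sizes
termination_by remaining.toNat
decreasing_by omega

def chunk_sizes_py (total_key_count : Int) (window_size : Int) : List Int :=
  chunkLoopA window_size total_key_count []

-- ===== PORT B =====
def chunk_sizes_py_alt (total_key_count : Int) (window_size : Int) : List Int :=
  if total_key_count ≤ 0 then []
  else
    let full := PySem.Int.floordiv total_key_count window_size
    let rem := PySem.Int.mod total_key_count window_size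
    List.replicate full.toNat window_size ++ (if rem ≠ 0 then [rem] else [])

-- ===== PRECONDITION & SPEC =====
-- Pre_ excludes total_key_count > 0 with window_size ≤ 0, where Python A never terminates
-- (the loop makes no progress); on those inputs A returns nothing to match.
def Pre_chunk_sizes_py (total_key_count : Int) (window_size : Int) : Prop :=
  total_key_count ≤ 0 ∨ 0 < window_size
instance (total_key_count : Int) (window_size : Int) : Decidable (Pre_chunk_sizes_py total_key_count window_size) := by unfold Pre_chunk_sizes_py; infer_instance

def pvWitness_chunk_sizes_py : Int × Int := (7, 3)

def Spec_chunk_sizes_py (total_key_count : Int) (window_size : Int) (out : List Int) : Prop := out = chunk_sizes_py_alt total_key_count window_size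
instance (total_key_count : Int) (window_size : Int) (out : List Int) : Decidable (Spec_chunk_sizes_py total_key_count window_size out) := by unfold Spec_chunk_sizes_py; infer_instance

-- ===== CLAIM (what is proved, stated in full; the proofs are below) =====
def Claim_equal_chunk_sizes_py : Prop := ∀ (total_key_count : Int) (window_size : Int), Dom_chunk_sizes_py total_key_count window_size → Pre_chunk_sizes_py total_key_count window_size → Spec_chunk_sizes_py total_key_count window_size (chunk_sizes_py total_key_count window_size)

-- ===== LEMMAS AND PROOFS =====

lemma alt_nonpos (t ws : Int) (h : t ≤ 0) : chunk_sizes_py_alt t ws = [] := by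
  simp [chunk_sizes_py_alt, h]

lemma alt_last (t ws : Int) (h0 : 0 < t) (h1 : t ≤ ws) : chunk_sizes_py_alt t ws = [t] := by
  have hws : (0:Int) < ws := lt_of_lt_of_le h0 h1
  rcases lt_or_eq_of_le h1 with hlt | heq
  · have hfd : PySem.Int.floordiv t ws = 0 :=
      (PySem.Int.floordiv_eq_iff_of_pos hws).2 (by constructor <;> [omega; nlinarith])
    have hm : PySem.Int.mod t ws = t := by
      have := PySem.Int.floordiv_mul_add_mod t ws
      rw [hfd] at this; omega
    have hne : t ≠ 0 := by omega
    simp [chunk_sizes_py_alt, hfd, hm, not_le.2 h0, hne]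
  · subst heq
    have hfd : PySem.Int.floordiv t t = 1 :=
      (PySem.Int.floordiv_eq_iff_of_pos h0).2 (by constructor <;> nlinarith)
    have hm : PySem.Int.mod t t = 0 := by
      have := PySem.Int.floordiv_mul_add_mod t t
      rw [hfd] at this; omega
    simp [chunk_sizes_py_alt, hfd, hm, not_le.2 h0]

lemma alt_step (t ws : Int) (hws : 0 < ws) (h : ws < t) :
    chunk_sizes_py_alt t ws = ws :: chunk_sizes_py_alt (t - ws) ws := by
  have ht' : (0:Int) < t - ws := by omega
  set q := PySem.Int.floordiv (t - ws) ws with hq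
  set r := PySem.Int.mod (t - ws) ws with hr
  have hdm : q * ws + r = t - ws := PySem.Int.floordiv_mul_add_mod (t - ws) ws
  have hr0 : 0 ≤ r := PySem.Int.mod_nonneg (t - ws) hws
  have hr1 : r < ws := PySem.Int.mod_lt (t - ws) hws
  have hq0 : 0 ≤ q := (PySem.Int.le_floordiv_iff_mul_le hws).2 (by omega)
  have hfd : PySem.Int.floordiv t ws = q + 1 :=
    (PySem.Int.floordiv_eq_iff_of_pos hws).2 (by constructor <;> nlinarith)
  have hm : PySem.Int.mod t ws = r := by
    have := PySem.Int.floordiv_mul_add_mod t ws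
    rw [hfd] at this; nlinarith
  have htn : (q + 1).toNat = q.toNat + 1 := by omega
  simp only [chunk_sizes_py_alt, hfd, hm, ← hq, ← hr, if_neg (by omega : ¬ t ≤ 0),
    if_neg (by omega : ¬ t - ws ≤ 0), htn, List.replicate_succ, List.cons_append]

lemma le_or_lt_int (a b : Int) : a ≤ b ∨ b < a := by omega

lemma loop_eq (ws : Int) (hws : 0 < ws) :
    ∀ n (t : Int), t.toNat = n → ∀ acc, chunkLoopA ws t acc = acc ++ chunk_sizes_py_alt t ws := by
  intro n
  induction n using Nat.strong_induction_on with
  | _ n ih =>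
    intro t hn acc
    rw [chunkLoopA]
    by_cases ht : t > 0
    · have hsz : 0 < min ws t := by omega
      simp only [ht, hsz, dif_pos]
      rcases le_or_lt_int t ws with hle | hlt
      · have hmin : min ws t = t := by omega
        rw [hmin, chunkLoopA]
        simp [alt_last t ws ht hle]
      · have hmin : min ws t = ws := by omega
        rw [hmin, ih (t - ws).toNat (by omega) (t - ws) rfl (acc ++ [ws]),
          alt_step t ws hws hlt]
        simp
    · simp [ht, alt_nonpos t ws (by omega)]

-- ===== VERDICT (by name: the statement is the Claim_ definition above) =====
theorem chunk_sizes_py_spec : Claim_equal_chunk_sizes_py := by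
  intro t ws _ hpre
  unfold Spec_chunk_sizes_py chunk_sizes_py
  rcases hpre with h | h
  · rw [chunkLoopA]
    have hng : ¬ t > 0 := by omega
    simp [alt_nonpos t ws h, hng]
  · simpa using loop_eq ws h t.toNat t rfl []
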